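-- pv_equiv track=rewrite | github.com/VishalTheHuman/Leet-Code | 1003. Check If Word Is Valid After Substitutions/Solution_2.py | isValid
-- ===== SOURCE A (Python) =====
-- def isValid(s: str) -> bool:
--     while s:
--         found = False
--         for i in range(len(s)-2):
--             if s[i:i+3]=="abc":
--                 found = True
--                 s = s[:i]+s[i+3:]
--                 break
--         if not found:
--             return False
--     return True
-- ===== SOURCE B (Python) =====
-- def isValid(s: str) -> bool:
--     st = []
--     for ch in s:
--         if ch == 'c' and st[-2:] == ['a', 'b']:
--             del st[-2:]
--         else:
--             st.append(ch)
--     return not st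
-- ===== Notes on version B (the rewrite author's own statement) =====
-- stated objective: faster
-- what changed: Replaced the repeated scan-and-splice loop (rescan the whole string after each removal of the leftmost 'abc') with a single left-to-right pass maintaining a stack that cancels 'a','b' when a 'c' arrives; deletion of 'abc' has no self-overlap so the reduction is confluent and the stack computes the unique normal form.
import Mathlib
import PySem

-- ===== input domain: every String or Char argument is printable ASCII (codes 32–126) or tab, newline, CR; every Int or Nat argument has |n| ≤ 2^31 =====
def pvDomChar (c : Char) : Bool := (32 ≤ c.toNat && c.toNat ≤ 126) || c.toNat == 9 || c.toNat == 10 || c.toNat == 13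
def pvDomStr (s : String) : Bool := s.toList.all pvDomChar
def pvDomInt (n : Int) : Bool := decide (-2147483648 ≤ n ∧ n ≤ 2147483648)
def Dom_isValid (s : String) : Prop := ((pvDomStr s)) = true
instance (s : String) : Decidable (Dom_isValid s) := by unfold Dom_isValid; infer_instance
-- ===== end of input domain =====

-- B replaces A's repeated scan-and-splice removal of the leftmost "abc" with a single
-- left-to-right pass over a cancelling stack (objective: faster, one pass instead of rescans).


-- ===== PORT A =====
-- the inner 'for i in range(len(s)-2): if s[i:i+3]=="abc": … break' loop:
-- walks the index list, returns the first index whose 3-slice equals "abc" ("abc".toList = ['a','b','c'])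
def scanAbc (cs : List Char) : List Int → Option Int
  | [] => none
  | i :: rest =>
      if PySem.List.slice cs (some i) (some (i + 3)) = ['a', 'b', 'c'] then some i
      else scanAbc cs rest

theorem scanAbc_some {cs : List Char} {idxs : List Int} {i : Int}
    (h : scanAbc cs idxs = some i) :
    i ∈ idxs ∧ PySem.List.slice cs (some i) (some (i + 3)) = ['a', 'b', 'c'] := by
  induction idxs with
  | nil => simp [scanAbc] at h
  | cons j rest ih =>
    by_cases hj : PySem.List.slice cs (some j) (some (j + 3)) = ['a', 'b', 'c']
    · simp [scanAbc, hj] at h; subst h; exact ⟨List.mem_cons_self, hj⟩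
    · simp [scanAbc, hj] at h
      obtain ⟨hm, hs⟩ := ih h
      exact ⟨List.mem_cons_of_mem _ hm, hs⟩

-- termination fact for the while loop: each removal shortens the string
theorem removal_len {cs : List Char} {i : Int}
    (h : scanAbc cs (PySem.List.pyRange 0 (PySem.List.len cs - 2) 1) = some i) :
    (PySem.List.slice cs none (some i) ++ PySem.List.slice cs (some (i + 3)) none).length
      < cs.length := by
  obtain ⟨hmem, _⟩ := scanAbc_some h
  rw [PySem.List.mem_pyRange_one] at hmem
  obtain ⟨h0, hlt⟩ := hmem
  rw [PySem.List.len_eq] at hlt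
  rw [PySem.List.slice_to cs h0, PySem.List.slice_from cs (by omega)]
  simp only [List.length_append, List.length_take, List.length_drop]
  omega

-- the while loop of A (on s as a list of chars)
def isValidGo (cs : List Char) : Bool :=
  if cs = [] then true
  else
    match h : scanAbc cs (PySem.List.pyRange 0 (PySem.List.len cs - 2) 1) with
    | none => false
    | some i =>
        isValidGo (PySem.List.slice cs none (some i) ++ PySem.List.slice cs (some (i + 3)) none)
termination_by cs.length
decreasing_by exact removal_len h

def isValid (s : String) : Bool := isValidGo s.toList

-- ===== PORT B =====
-- one step of the for loop: on 'c' with the stack ending in 'a','b', delete those two, else push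
def stepB (st : List Char) (c : Char) : List Char :=
  if c = 'c' ∧ PySem.List.slice st (some (-2)) none = ['a', 'b'] then
    PySem.List.slice st none (some (-2))
  else st ++ [c]

def isValid_alt (s : String) : Bool := (s.toList.foldl stepB []).isEmpty

-- ===== PRECONDITION & SPEC =====
def Spec_isValid (s : String) (out : Bool) : Prop := out = isValid_alt s
instance (s : String) (out : Bool) : Decidable (Spec_isValid s out) := by unfold Spec_isValid; infer_instance

-- ===== CLAIM (what is proved, stated in full; the proofs are below) =====
def Claim_equal_isValid : Prop := ∀ (s : String), Dom_isValid s → Spec_isValid s (isValid s)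

-- ===== LEMMAS AND PROOFS =====

theorem scanAbc_none {cs : List Char} {idxs : List Int}
    (h : scanAbc cs idxs = none) :
    ∀ i ∈ idxs, PySem.List.slice cs (some i) (some (i + 3)) ≠ ['a', 'b', 'c'] := by
  induction idxs with
  | nil => intro i hi; simp at hi
  | cons j rest ih =>
    by_cases hj : PySem.List.slice cs (some j) (some (j + 3)) = ['a', 'b', 'c']
    · simp [scanAbc, hj] at h
    · simp [scanAbc, hj] at h
      intro i hi
      rcases List.mem_cons.mp hi with rfl | hmem
      · exact hj
      · exact ih h i hmem

-- pushing "abc" onto any stack cancels it away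
theorem stepB_abc (st : List Char) : List.foldl stepB st ['a', 'b', 'c'] = st := by
  simp only [List.foldl_cons, List.foldl_nil]
  have h1 : stepB st 'a' = st ++ ['a'] := by simp [stepB]
  have h2 : stepB (st ++ ['a']) 'b' = st ++ ['a', 'b'] := by simp [stepB]
  rw [h1, h2]
  have hdrop : PySem.List.slice (st ++ ['a', 'b']) (some (-2)) none = ['a', 'b'] := by
    rw [PySem.List.slice_from_neg_ofNat _ 2 (by omega)]
    simp
  have htake : PySem.List.slice (st ++ ['a', 'b']) none (some (-2)) = st := by
    rw [PySem.List.slice_to_neg_ofNat _ 2 (by omega)]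
    simp
  simp [stepB, hdrop, htake]

-- a string with no "abc" substring passes through the stack unchanged
theorem foldl_stepB_noAbc :
    ∀ (cs st : List Char), ¬ (['a', 'b', 'c'] <:+: (st ++ cs)) →
      List.foldl stepB st cs = st ++ cs := by
  intro cs
  induction cs with
  | nil => intro st _; simp
  | cons c rest ih =>
    intro st hinf
    have hstep : stepB st c = st ++ [c] := by
      unfold stepB
      rw [if_neg]
      rintro ⟨rfl, hsl⟩
      rw [PySem.List.slice_from_neg_ofNat _ 2 (by omega)] at hsl
      apply hinf
      refine ⟨st.take (st.length - 2), rest, ?_⟩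
      calc st.take (st.length - 2) ++ ['a', 'b', 'c'] ++ rest
          = st.take (st.length - 2) ++ ['a', 'b'] ++ 'c' :: rest := by simp
        _ = st ++ 'c' :: rest := by rw [← hsl, List.take_append_drop]
    rw [List.foldl_cons, hstep, ih (st ++ [c]) (by simpa using hinf)]
    simp
  
-- removing an "abc" occurrence anywhere does not change the final stack
theorem foldl_stepB_remove (u v : List Char) :
    List.foldl stepB [] (u ++ ['a', 'b', 'c'] ++ v) = List.foldl stepB [] (u ++ v) := by
  rw [List.foldl_append, List.foldl_append, stepB_abc, ← List.foldl_append]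

-- the while loop of A returns true iff the stack empties
theorem isValidGo_eq (cs : List Char) :
    isValidGo cs = (List.foldl stepB [] cs).isEmpty := by
  unfold isValidGo
  by_cases hnil : cs = []
  · simp [hnil]
  · simp only [hnil, if_false]
    split
    next h =>
      have hno : ¬ (['a', 'b', 'c'] <:+: cs) := by
        rintro ⟨u, v, rfl⟩
        have hlen : (u.length : Int) < PySem.List.len (u ++ ['a', 'b', 'c'] ++ v) - 2 := by
          rw [PySem.List.len_eq]; simp; omega
        refine scanAbc_none h (u.length : Int)
          (PySem.List.mem_pyRange_one.mpr ⟨by positivity, hlen⟩) ?_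
        rw [show ((u.length : Int) + 3) = ((u.length + 3 : Nat) : Int) by push_cast; ring,
          PySem.List.slice_natCast]
        simp
      rw [foldl_stepB_noAbc cs [] (by simpa using hno)]
      simpa using hnil
    next i h =>
      obtain ⟨hmem, hsl⟩ := scanAbc_some h
      rw [PySem.List.mem_pyRange_one] at hmem
      obtain ⟨h0, hlt⟩ := hmem
      rw [PySem.List.len_eq] at hlt
      rw [PySem.List.slice_toNat cs h0 (by omega)] at hsl
      have h3 : (i + 3).toNat - i.toNat = 3 := by omega
      rw [h3] at hsl
      have hdec : cs = cs.take i.toNat ++ ['a', 'b', 'c'] ++ cs.drop (i.toNat + 3) := by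
        conv_lhs => rw [← List.take_append_drop i.toNat cs]
        rw [List.append_assoc]
        congr 1
        conv_lhs => rw [← List.take_append_drop 3 (cs.drop i.toNat)]
        rw [hsl, List.drop_drop]
      rw [PySem.List.slice_to cs h0, PySem.List.slice_from cs (by omega)]
      have hn3 : (i + 3).toNat = i.toNat + 3 := by omega
      rw [hn3]
      rw [isValidGo_eq (cs.take i.toNat ++ cs.drop (i.toNat + 3))]
      conv_rhs => rw [hdec]
      rw [foldl_stepB_remove]
termination_by cs.length
decreasing_by simp only [PySem.List.len_eq] at hlt; simp only [List.length_append, List.length_take, List.length_drop]; omega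

-- ===== VERDICT (by name: the statement is the Claim_ definition above) =====
theorem isValid_spec : Claim_equal_isValid := by
  intro s _
  unfold Spec_isValid isValid isValid_alt
  exact isValidGo_eq s.toList
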